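-- pv_equiv track=rewrite | github.com/Grigory-T/excel-formula-parser | formula_graph/formula_graph.py | _split_ref_prefix
-- ===== SOURCE A (Python) =====
-- def _split_ref_prefix(ref: str) -> tuple[str | None, str]:
--     in_quotes = False
--     i = 0
--     while i < len(ref):
--         char = ref[i]
--         if char == "'":
--             if in_quotes and i + 1 < len(ref) and ref[i + 1] == "'":
--                 i += 2
--                 continue
--             in_quotes = not in_quotes
--         elif char == "!" and not in_quotes:
--             return ref[:i], ref[i + 1:]
--         i += 1
--     return None, ref
-- ===== SOURCE B (Python) =====
-- def _quoted_end(ref, i):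
--     # i is just past an opening quote; return the index just past the closing
--     # quote of the quoted run (with '' as an escaped quote), or None if unterminated
--     n = len(ref)
--     while i < n:
--         if ref[i] == "'":
--             if i + 1 < n and ref[i + 1] == "'":
--                 i += 2
--             else:
--                 return i + 1
--         else:
--             i += 1
--     return None
--
--
-- def _scan(ref, i):
--     # return the index of the first unquoted '!' at or after i, or None
--     n = len(ref)
--     while i < n:
--
--         if ref[i] == "!":
--             return i
--         if ref[i] == "'":
--             j = _quoted_end(ref, i + 1)
--             if j is None:
--                 return None
--             i = j
--         else:
--             i += 1
--     return None
--
--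
-- def _split_ref_prefix(ref):
--     i = _scan(ref, 0)
--     if i is None:
--         return None, ref
--     return ref[:i], ref[i + 1:]
-- ===== Notes on version B (the rewrite author's own statement) =====
-- stated objective: alternative
-- what changed: Replaces A's single index loop carrying an in_quotes boolean state flag with a recursive-descent decomposition: a scanner for unquoted context that delegates each quoted run (with '' escapes) to a separate _quoted_end helper, eliminating the mode flag.
import Mathlib
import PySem

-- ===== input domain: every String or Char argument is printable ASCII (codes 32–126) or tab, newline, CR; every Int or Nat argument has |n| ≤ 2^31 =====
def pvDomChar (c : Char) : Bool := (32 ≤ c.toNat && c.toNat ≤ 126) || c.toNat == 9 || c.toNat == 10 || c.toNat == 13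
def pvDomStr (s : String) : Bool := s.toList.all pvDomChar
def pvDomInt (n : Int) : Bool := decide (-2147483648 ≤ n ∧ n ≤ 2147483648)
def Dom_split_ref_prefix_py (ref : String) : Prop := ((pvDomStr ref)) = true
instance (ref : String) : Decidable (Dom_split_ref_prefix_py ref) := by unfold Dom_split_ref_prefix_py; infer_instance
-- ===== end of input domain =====

-- B replaces A's single loop with an in_quotes mode flag by a recursive-descent
-- decomposition (unquoted scanner + separate quoted-run helper); same cost, no flag.

-- ===== PORT A =====
-- the while loop of A: state = (in_quotes, i); ref[:i]/ref[i+1:] with i ≥ 0 are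
-- exactly List.take i / List.drop (i+1)
def pvALoop (s : List Char) (inq : Bool) (i : Nat) : Option String × String :=
  if h : i < s.length then
    let c := s[i]
    if c == '\'' then
      if inq && (decide (i + 1 < s.length) && (s.getD (i + 1) ' ' == '\'')) then
        pvALoop s inq (i + 2)
      else
        pvALoop s (!inq) (i + 1)
    else if c == '!' && !inq then
      (some (String.ofList (s.take i)), String.ofList (s.drop (i + 1)))
    else
      pvALoop s inq (i + 1)
  else
    (none, String.ofList s)
termination_by s.length - i

def split_ref_prefix_py (ref : String) : Option String × String :=
  pvALoop ref.toList false 0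

-- ===== PORT B =====
-- port of Source B's _quoted_end: index just past the closing quote, or none
def pvQuotedEnd (s : List Char) (i : Nat) : Option Nat :=
  if h : i < s.length then
    if s[i] == '\'' then
      if decide (i + 1 < s.length) && (s.getD (i + 1) ' ' == '\'') then
        pvQuotedEnd s (i + 2)
      else
        some (i + 1)
    else
      pvQuotedEnd s (i + 1)
  else
    none
termination_by s.length - i

-- needed by pvScan's decreasing_by: a quoted run ends strictly after it starts
theorem pvQuotedEnd_gt (s : List Char) (i : Nat) :
    ∀ j, pvQuotedEnd s i = some j → i < j := by
  fun_induction pvQuotedEnd s i with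
  | case1 x h h2 h3 ih => intro j hj; have := ih j hj; omega
  | case2 x h h2 h3 => intro j hj; simp at hj; omega
  | case3 x h h2 ih => intro j hj; have := ih j hj; omega
  | case4 x h => intro j hj; simp at hj

-- port of Source B's _scan: index of the first unquoted '!' at/after i, or none
def pvScan (s : List Char) (i : Nat) : Option Nat :=
  if h : i < s.length then
    if s[i] == '!' then
      some i
    else if s[i] == '\'' then
      match hq : pvQuotedEnd s (i + 1) with
      | none => none
      | some j => pvScan s j
    else
      pvScan s (i + 1)
  else
    none
termination_by s.length - i
decreasing_by
  · have := pvQuotedEnd_gt s (i + 1) j hq; omega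
  · omega

def split_ref_prefix_py_alt (ref : String) : Option String × String :=
  match pvScan ref.toList 0 with
  | none => (none, ref)
  | some i => (some (String.ofList (ref.toList.take i)), String.ofList (ref.toList.drop (i + 1)))

-- ===== PRECONDITION & SPEC =====
def Spec_split_ref_prefix_py (ref : String) (out : Option String × String) : Prop := out = split_ref_prefix_py_alt ref
instance (ref : String) (out : Option String × String) : Decidable (Spec_split_ref_prefix_py ref out) := by unfold Spec_split_ref_prefix_py; infer_instance

-- ===== CLAIM (what is proved, stated in full; the proofs are below) =====
def Claim_equal_split_ref_prefix_py : Prop := ∀ (ref : String), Dom_split_ref_prefix_py ref → Spec_split_ref_prefix_py ref (split_ref_prefix_py ref)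

-- ===== LEMMAS AND PROOFS =====

-- A's loop in quoted mode is: find the end of the quoted run, then resume unquoted
theorem pvALoop_true (s : List Char) (i : Nat) :
    pvALoop s true i =
      (pvQuotedEnd s i).elim (none, String.ofList s) (fun j => pvALoop s false j) := by
  fun_induction pvQuotedEnd s i with
  | case1 x h h2 h3 ih =>
    rw [pvALoop]
    simp only [h, h2, h3, dif_pos, if_pos, Bool.true_and]
    exact ih
  | case2 x h h2 h3 =>
    rw [pvALoop]
    simp only [h, h2, dif_pos, if_pos, Bool.true_and, h3]
    simp
  | case3 x h h2 ih =>
    rw [pvALoop]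
    have hne : ¬ (s[x] == '!' && !true) = true := by simp
    simp only [h, h2, dif_pos, Bool.true_and, hne]
    exact ih
  | case4 x h =>
    rw [pvALoop]
    simp [h]

-- A's loop in unquoted mode computes exactly B's scan-then-slice
theorem pvALoop_false (s : List Char) (i : Nat) :
    pvALoop s false i =
      (pvScan s i).elim (none, String.ofList s)
        (fun j => (some (String.ofList (s.take j)), String.ofList (s.drop (j + 1)))) := by
  fun_induction pvScan s i with
  | case1 x h hbang =>
    rw [pvALoop]
    have hq : ¬ (s[x] == '\'') = true := by
      have := beq_iff_eq.mp hbang; simp [this]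
    simp [h, hbang, hq]
  | case2 x h hbang hq hqe =>
    rw [pvALoop]
    simp only [h, hbang, hq, dif_pos, if_pos, Bool.false_and]
    rw [if_neg (by simp), Bool.not_false, pvALoop_true, hqe]
    simp
  | case3 x h hbang hq j hqe ih =>
    rw [pvALoop]
    simp only [h, hbang, hq, dif_pos, if_pos, Bool.false_and]
    rw [if_neg (by simp), Bool.not_false, pvALoop_true, hqe]
    simpa using ih
  | case4 x h hbang hq ih =>
    rw [pvALoop]
    simp only [h, hbang, hq, dif_pos, Bool.false_and]
    exact ih
  | case5 x h =>
    rw [pvALoop]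
    simp [h]

-- ===== VERDICT (by name: the statement is the Claim_ definition above) =====
theorem split_ref_prefix_py_spec : Claim_equal_split_ref_prefix_py := by
  intro ref _
  unfold Spec_split_ref_prefix_py split_ref_prefix_py split_ref_prefix_py_alt
  rw [pvALoop_false]
  cases pvScan ref.toList 0 with
  | none => simp
  | some j => simp
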